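-- pv_equiv track=rewrite | github.com/Louis765900/Lumina | app/core/recovery.py | _logical_drive_from_device
-- ===== SOURCE A (Python) =====
-- def _logical_drive_from_device(device: str) -> str:
--     value = device.strip().replace("/", "\\")
--     upper = value.upper()
--     if len(upper) >= 2 and upper[1] == ":" and upper.rstrip("\\") == upper[:2]:
--         return upper[:2]
--     for prefix in ("\\\\.\\", "\\\\?\\"):
--         if upper.startswith(prefix) and len(upper) >= len(prefix) + 2:
--             candidate = upper[len(prefix):len(prefix) + 2]
--             if len(candidate) == 2 and candidate[1] == ":":
--                 return candidate
--     return ""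
-- ===== SOURCE B (Python) =====
-- import re
--
-- def _logical_drive_from_device(device: str) -> str:
--     value = device.strip().replace("/", "\\").upper()
--     m = re.fullmatch(r"(.:)\\*", value, re.DOTALL)
--     if m:
--         return m.group(1)
--     m = re.match(r"\\\\[.?]\\(.:)", value, re.DOTALL)
--     if m:
--         return m.group(1)
--     return ""
-- ===== Notes on version B (the rewrite author's own statement) =====
-- stated objective: idiomatic
-- what changed: Replaces A's hand-rolled branch checks (rstrip comparison, explicit prefix loop with slicing) by two anchored regular-expression matches on the normalized string.
import Mathlib
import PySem

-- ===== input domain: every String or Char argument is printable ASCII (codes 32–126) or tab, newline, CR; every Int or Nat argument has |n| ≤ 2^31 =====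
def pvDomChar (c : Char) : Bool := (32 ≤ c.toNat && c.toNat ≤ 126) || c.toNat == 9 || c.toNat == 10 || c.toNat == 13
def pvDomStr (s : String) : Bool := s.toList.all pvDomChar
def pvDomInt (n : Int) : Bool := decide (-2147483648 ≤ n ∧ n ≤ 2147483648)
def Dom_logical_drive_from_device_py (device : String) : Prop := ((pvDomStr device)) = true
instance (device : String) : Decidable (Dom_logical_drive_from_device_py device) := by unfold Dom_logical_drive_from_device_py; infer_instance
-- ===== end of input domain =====

-- B replaces A's manual branch checks with two anchored regex matches (ported by hand as shape matches); objective: idiomatic.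

-- ===== PORT A =====
-- helper: the body of A's 'for prefix in (...)' loop for one prefix (some c = 'return c', none = continue)
def pyDriveCheckPrefix (u p : List Char) : Option (List Char) :=
  if PySem.Chars.startswith u p = true ∧ p.length + 2 ≤ u.length then
    let candidate := PySem.List.slice u (some (p.length : Int)) (some ((p.length : Int) + 2))
    if candidate.length = 2 ∧ PySem.List.pyGet? candidate 1 = some ':' then some candidate
    else none
  else none

-- helper: A's code after the normalization, on the code points of 'upper'
def pyDriveCore (upper : List Char) : String :=
  -- upper.rstrip("\\") is ported by hand as reverse/dropWhile/reverse (exact: drops exactly the trailing backslashes)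
  if 2 ≤ upper.length ∧ PySem.List.pyGet? upper 1 = some ':' ∧
      ((upper.reverse.dropWhile (· == '\\')).reverse = PySem.List.slice upper none (some 2)) then
    String.ofList (PySem.List.slice upper none (some 2))
  else
    match pyDriveCheckPrefix upper ['\\', '\\', '.', '\\'] with
    | some c => String.ofList c
    | none =>
      match pyDriveCheckPrefix upper ['\\', '\\', '?', '\\'] with
      | some c => String.ofList c
      | none => ""

def logical_drive_from_device_py (device : String) : String :=
  pyDriveCore ((PySem.Str.upper (PySem.Str.replace (PySem.Str.strip device) "/" "\\")).toList)

-- ===== PORT B =====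
-- hand port of re.fullmatch(r"(.:)\\*", value, re.DOTALL): any char, ':', then only backslashes; group 1
def pvFullmatchDrive (u : List Char) : Option (List Char) :=
  match u with
  | c0 :: c1 :: rest => if c1 = ':' ∧ rest.all (· == '\\') then some [c0, ':'] else none
  | _ => none

-- hand port of re.match(r"\\\\[.?]\\(.:)", value, re.DOTALL): anchored 6-char pattern, rest ignored; group 1
def pvMatchDevPrefix (u : List Char) : Option (List Char) :=
  match u with
  | a :: b :: d :: e :: c :: f :: _ =>
    if a = '\\' ∧ b = '\\' ∧ (d = '.' ∨ d = '?') ∧ e = '\\' ∧ f = ':' then some [c, ':'] else none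
  | _ => none

-- helper: B's two regex attempts on the normalized code points
def pvDriveCoreAlt (value : List Char) : String :=
  match pvFullmatchDrive value with
  | some g => String.ofList g
  | none =>
    match pvMatchDevPrefix value with
    | some g => String.ofList g
    | none => ""

def logical_drive_from_device_py_alt (device : String) : String :=
  pvDriveCoreAlt ((PySem.Str.upper (PySem.Str.replace (PySem.Str.strip device) "/" "\\")).toList)

-- ===== PRECONDITION & SPEC =====
def Spec_logical_drive_from_device_py (device : String) (out : String) : Prop := out = logical_drive_from_device_py_alt device
instance (device : String) (out : String) : Decidable (Spec_logical_drive_from_device_py device out) := by unfold Spec_logical_drive_from_device_py; infer_instance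

-- ===== CLAIM (what is proved, stated in full; the proofs are below) =====
def Claim_equal_logical_drive_from_device_py : Prop := ∀ (device : String), Dom_logical_drive_from_device_py device → Spec_logical_drive_from_device_py device (logical_drive_from_device_py device)

-- ===== LEMMAS AND PROOFS =====

-- rstrip("\\") (on c0 :: ':' :: rest, reversed) equals "X:" iff everything after "X:" is backslashes
lemma pv_rstrip_iff (c0 : Char) (l : List Char) :
    ((l ++ [':', c0]).dropWhile (· == '\\')).reverse = [c0, ':'] ↔ l.all (· == '\\') = true := by
  induction l with
  | nil => simp
  | cons a l ih =>
    by_cases ha : a = '\\'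
    · simp [ha, ih]
    · constructor
      · intro h
        exfalso
        have hlen := congrArg List.length h
        simp [ha] at hlen
      · intro h; simp [ha] at h

lemma check_short (u : List Char) (p0 p1 p2 p3 : Char) (h : u.length < 6) :
    pyDriveCheckPrefix u [p0,p1,p2,p3] = none := by
  unfold pyDriveCheckPrefix
  rw [if_neg]
  rintro ⟨-, h2⟩
  simp at h2
  omega

lemma check_eval (p0 p1 p2 p3 c0 c1 d e c f : Char) (t : List Char) :
    pyDriveCheckPrefix (c0::c1::d::e::c::f::t) [p0,p1,p2,p3] =
      if c0 = p0 ∧ c1 = p1 ∧ d = p2 ∧ e = p3 ∧ f = ':' then some [c, f] else none := by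
  unfold pyDriveCheckPrefix
  have h1 : PySem.Chars.startswith (c0::c1::d::e::c::f::t) [p0,p1,p2,p3] = true ↔ (c0=p0 ∧ c1=p1 ∧ d=p2 ∧ e=p3) := by
    rw [PySem.Chars.startswith_iff]
    simp [List.cons_prefix_cons, eq_comm]
  have h2 : PySem.List.slice (c0::c1::d::e::c::f::t) (some (([p0,p1,p2,p3].length : Nat) : Int)) (some ((([p0,p1,p2,p3].length : Nat) : Int) + 2)) = [c, f] := by
    simp [PySem.List.slice_toNat]
  simp only [h2, h1]
  split_ifs with hA hB hC <;> simp_all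

-- the two cores agree on every code-point list
lemma pvDriveCore_eq (u : List Char) : pyDriveCore u = pvDriveCoreAlt u := by
  match u with
  | [] =>
    unfold pyDriveCore
    rw [check_short _ _ _ _ _ (by simp), check_short _ _ _ _ _ (by simp)]
    simp [pvDriveCoreAlt, pvFullmatchDrive, pvMatchDevPrefix]
  | [c0] =>
    unfold pyDriveCore
    rw [check_short _ _ _ _ _ (by simp), check_short _ _ _ _ _ (by simp)]
    simp [pvDriveCoreAlt, pvFullmatchDrive, pvMatchDevPrefix]
  | c0 :: c1 :: rest =>
    have hget : PySem.List.pyGet? (c0 :: c1 :: rest) 1 = some c1 := by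
      simp [PySem.List.pyGet?, PySem.List.pyIdx?]
    have hsl : PySem.List.slice (c0 :: c1 :: rest) none (some 2) = [c0, c1] := by
      simp [PySem.List.slice_to]
    have hrev : (c0 :: c1 :: rest).reverse = rest.reverse ++ [c1, c0] := by simp
    have hbs : ¬ ((':' : Char) = '\\') := by decide
    by_cases hc1 : c1 = ':'
    · subst hc1
      by_cases hall : rest.all (· == '\\') = true
      · unfold pyDriveCore
        simp only [pvDriveCoreAlt, pvFullmatchDrive]
        rw [if_pos ⟨by simp, hget, by rw [hrev, hsl]; exact (pv_rstrip_iff c0 rest.reverse).2 (by simpa using hall)⟩]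
        rw [hsl]
        simp [hall]
      · unfold pyDriveCore
        simp only [pvDriveCoreAlt, pvFullmatchDrive, pvMatchDevPrefix]
        rw [if_neg (by
          rintro ⟨-, -, h⟩
          rw [hrev, hsl] at h
          exact hall (by simpa using (pv_rstrip_iff c0 rest.reverse).1 h))]
        match rest with
        | [] =>
          rw [check_short _ _ _ _ _ (by simp), check_short _ _ _ _ _ (by simp)]
          simp [hall]
        | [d] =>
          rw [check_short _ _ _ _ _ (by simp), check_short _ _ _ _ _ (by simp)]
          simp [hall]
        | [d, e] =>
          rw [check_short _ _ _ _ _ (by simp), check_short _ _ _ _ _ (by simp)]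
          simp [hall]
        | [d, e, c] =>
          rw [check_short _ _ _ _ _ (by simp), check_short _ _ _ _ _ (by simp)]
          simp [hall]
        | d :: e :: c :: f :: t =>
          rw [check_eval, check_eval]
          simp [hall, hbs]
    · unfold pyDriveCore
      simp only [pvDriveCoreAlt, pvFullmatchDrive, pvMatchDevPrefix]
      rw [if_neg (by
        rintro ⟨-, h, -⟩
        rw [hget] at h
        exact hc1 (by injection h))]
      match rest with
      | [] =>
        rw [check_short _ _ _ _ _ (by simp), check_short _ _ _ _ _ (by simp)]
        simp [hc1]
      | [d] =>
        rw [check_short _ _ _ _ _ (by simp), check_short _ _ _ _ _ (by simp)]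
        simp [hc1]
      | [d, e] =>
        rw [check_short _ _ _ _ _ (by simp), check_short _ _ _ _ _ (by simp)]
        simp [hc1]
      | [d, e, c] =>
        rw [check_short _ _ _ _ _ (by simp), check_short _ _ _ _ _ (by simp)]
        simp [hc1]
      | d :: e :: c :: f :: t =>
        rw [if_neg (by rintro ⟨h, -⟩; exact hc1 h), check_eval, check_eval]
        split_ifs with hA hB <;> try simp_all
        rw [if_neg]
        rintro ⟨h0, h1, hd | hd, he, hf⟩ <;> simp_all

-- ===== VERDICT (by name: the statement is the Claim_ definition above) =====
theorem logical_drive_from_device_py_spec : Claim_equal_logical_drive_from_device_py := by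
  intro device _
  unfold Spec_logical_drive_from_device_py logical_drive_from_device_py logical_drive_from_device_py_alt
  exact pvDriveCore_eq _
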